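-- pv_equiv track=rewrite | github.com/Ag3497120/verantyx-v6 | synth_results/995c5fa3.py | transform
-- ===== SOURCE A (Python) =====
-- def transform(grid):
--     rows = len(grid)
--     cols = len(grid[0])
--
--     sep_cols = [c for c in range(cols) if all(grid[r][c]==0 for r in range(rows))]
--     block_starts = [0] + [c+1 for c in sep_cols]
--     block_ends = sep_cols + [cols]
--
--     pattern_map = {
--         ((1,1),(1,2),(2,1),(2,2)): 8,
--         (): 2,
--         ((2,1),(2,2),(3,1),(3,2)): 4,
--         ((1,0),(1,3),(2,0),(2,3)): 3,
--     }
--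
--     result = []
--     for bi, (bs, be) in enumerate(zip(block_starts, block_ends)):
--         block = [[grid[r][c] for c in range(bs, be)] for r in range(rows)]
--         zeros = tuple((r,c) for r in range(rows) for c in range(be-bs) if block[r][c]==0)
--         val = pattern_map.get(zeros, 2)
--         result.append([val]*3)
--
--     return result
-- ===== SOURCE B (Python) =====
-- def transform(grid):
--     rows = len(grid)
--     cols = len(grid[0])
--
--     pattern_map = {
--         ((1,1),(1,2),(2,1),(2,2)): 8,
--         (): 2,
--         ((2,1),(2,2),(3,1),(3,2)): 4,
--         ((1,0),(1,3),(2,0),(2,3)): 3,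
--     }
--
--     def finalize(zero_cols):
--         zeros = tuple((r, x) for r, cs in enumerate(zero_cols) for x in cs)
--         return [pattern_map.get(zeros, 2)] * 3
--
--     result = []
--     start = 0
--     zero_cols = [[] for _ in range(rows)]  # per-row relative zero columns of the current block
--     for c in range(cols):
--         if all(grid[r][c] == 0 for r in range(rows)):
--             # separator column: close the current block (possibly empty)
--             result.append(finalize(zero_cols))
--             zero_cols = [[] for _ in range(rows)]
--             start = c + 1
--         else:
--             zero_cols = [cs + [c - start] if grid[r][c] == 0 else cs
--                          for r, cs in enumerate(zero_cols)]
--     result.append(finalize(zero_cols))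
--     return result
-- ===== Notes on version B (the rewrite author's own statement) =====
-- stated objective: alternative
-- what changed: Replaces A's precomputation of separator columns and block start/end lists plus per-block materialization and rescan with a single left-to-right sweep over columns that keeps per-row accumulators of relative zero positions and finalizes a block at each separator.
import Mathlib
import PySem

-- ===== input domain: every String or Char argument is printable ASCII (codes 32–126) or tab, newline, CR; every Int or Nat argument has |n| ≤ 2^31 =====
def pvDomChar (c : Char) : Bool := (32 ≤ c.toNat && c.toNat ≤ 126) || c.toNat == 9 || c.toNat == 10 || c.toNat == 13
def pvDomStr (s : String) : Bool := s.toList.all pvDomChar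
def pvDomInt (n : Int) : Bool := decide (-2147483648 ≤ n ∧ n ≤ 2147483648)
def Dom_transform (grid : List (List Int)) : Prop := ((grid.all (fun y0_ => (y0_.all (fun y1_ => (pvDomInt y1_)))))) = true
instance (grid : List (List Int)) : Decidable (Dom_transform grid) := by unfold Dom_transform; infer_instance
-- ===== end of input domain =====

-- B replaces A's precomputed separator/block-boundary passes by a single left-to-right sweep over
-- columns with per-row accumulators of relative zero positions (objective: alternative decomposition).

-- shared indexing helper: grid[r][c]; exact whenever the indices are in range (guaranteed by Pre_)
def pvAt (grid : List (List Int)) (r c : Int) : Int :=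
  PySem.List.pyGetD (PySem.List.pyGetD grid r []) c 0

-- ===== PORT A =====
def transform (grid : List (List Int)) : List (List Int) :=
  let rows : Int := (grid.length : Int)
  let cols : Int := ((PySem.List.pyGetD grid 0 []).length : Int)  -- grid[0]; nonempty under Pre_
  let sep_cols : List Int := (PySem.List.pyRange 0 cols).filter
      (fun c => (PySem.List.pyRange 0 rows).all (fun r => pvAt grid r c == 0))
  let block_starts : List Int := 0 :: sep_cols.map (fun c => c + 1)
  let block_ends : List Int := sep_cols ++ [cols]
  let pattern_map : PySem.Dict (List (Int × Int)) Int :=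
    PySem.Dict.mk [([(1,1),(1,2),(2,1),(2,2)], 8), ([], 2),
                   ([(2,1),(2,2),(3,1),(3,2)], 4), ([(1,0),(1,3),(2,0),(2,3)], 3)]
  (PySem.List.enumerate (List.zip block_starts block_ends)).foldl
    (fun result bp =>
      let bs := bp.2.1
      let be := bp.2.2
      let block : List (List Int) := (PySem.List.pyRange 0 rows).map
        (fun r => (PySem.List.pyRange bs be).map (fun c => pvAt grid r c))
      let zeros : List (Int × Int) := (PySem.List.pyRange 0 rows).flatMap
        (fun r => (PySem.List.pyRange 0 (be - bs)).filterMap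
          (fun c => if pvAt block r c == 0 then some (r, c) else none))
      let val := PySem.Dict.getD pattern_map zeros 2
      result ++ [List.replicate 3 val]) []

-- ===== PORT B =====
def transform_alt (grid : List (List Int)) : List (List Int) :=
  let rows : Int := (grid.length : Int)
  let cols : Int := ((PySem.List.pyGetD grid 0 []).length : Int)
  let pattern_map : PySem.Dict (List (Int × Int)) Int :=
    PySem.Dict.mk [([(1,1),(1,2),(2,1),(2,2)], 8), ([], 2),
                   ([(2,1),(2,2),(3,1),(3,2)], 4), ([(1,0),(1,3),(2,0),(2,3)], 3)]
  let finalize : List (List Int) → List Int := fun zero_cols =>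
    let zeros : List (Int × Int) :=
      (PySem.List.enumerate zero_cols).flatMap (fun rcs => rcs.2.map (fun x => (rcs.1, x)))
    List.replicate 3 (PySem.Dict.getD pattern_map zeros 2)
  let fin := (PySem.List.pyRange 0 cols).foldl
    (fun (st : Int × List (List Int) × List (List Int)) c =>
      if (PySem.List.pyRange 0 rows).all (fun r => pvAt grid r c == 0) then
        (c + 1, (PySem.List.pyRange 0 rows).map (fun _ => ([] : List Int)),
         st.2.2 ++ [finalize st.2.1])
      else
        (st.1,
         (PySem.List.enumerate st.2.1).map
           (fun rcs => if pvAt grid rcs.1 c == 0 then rcs.2 ++ [c - st.1] else rcs.2),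
         st.2.2))
    (0, (PySem.List.pyRange 0 rows).map (fun _ => ([] : List Int)), [])
  fin.2.2 ++ [finalize fin.2.1]

-- ===== PRECONDITION & SPEC =====
-- Pre_ excludes exactly the inputs where the Python A raises IndexError: the empty grid
-- (grid[0]) and ragged grids with a row shorter than the first row (grid[r][c]).
def Pre_transform (grid : List (List Int)) : Prop :=
  grid ≠ [] ∧ ∀ row ∈ grid, (grid.headD []).length ≤ row.length
instance (grid : List (List Int)) : Decidable (Pre_transform grid) := by
  unfold Pre_transform; infer_instance

def pvWitness_transform : List (List Int) := [[1, 0], [0, 1]]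

def Spec_transform (grid : List (List Int)) (out : List (List Int)) : Prop := out = transform_alt grid
instance (grid : List (List Int)) (out : List (List Int)) : Decidable (Spec_transform grid out) := by
  unfold Spec_transform; infer_instance

-- ===== CLAIM (what is proved, stated in full; the proofs are below) =====
def Claim_equal_transform : Prop :=
  ∀ (grid : List (List Int)), Dom_transform grid → Pre_transform grid →
    Spec_transform grid (transform grid)

-- ===== LEMMAS AND PROOFS =====

def pvPM : PySem.Dict (List (Int × Int)) Int :=
  PySem.Dict.mk [([(1,1),(1,2),(2,1),(2,2)], 8), ([], 2),
                 ([(2,1),(2,2),(3,1),(3,2)], 4), ([(1,0),(1,3),(2,0),(2,3)], 3)]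
def pvSep (grid : List (List Int)) (rows c : Int) : Bool :=
  (PySem.List.pyRange 0 rows).all (fun r => pvAt grid r c == 0)
def pvZlist (grid : List (List Int)) (r bs c : Int) : List Int :=
  (PySem.List.pyRange 0 (c - bs)).filter (fun x => pvAt grid r (bs + x) == 0)
def pvAcc (grid : List (List Int)) (rows bs c : Int) : List (List Int) :=
  (PySem.List.pyRange 0 rows).map (fun r => pvZlist grid r bs c)
def pvZeros (grid : List (List Int)) (rows bs be : Int) : List (Int × Int) :=
  (PySem.List.pyRange 0 rows).flatMap (fun r => (pvZlist grid r bs be).map (fun x => (r, x)))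
def pvRow (grid : List (List Int)) (rows bs be : Int) : List Int :=
  List.replicate 3 (PySem.Dict.getD pvPM (pvZeros grid rows bs be) 2)
def pvGA (grid : List (List Int)) (rows : Int) (p : Int × Int) : List Int :=
  let bs := p.1
  let be := p.2
  let block : List (List Int) := (PySem.List.pyRange 0 rows).map
    (fun r => (PySem.List.pyRange bs be).map (fun c => pvAt grid r c))
  let zeros : List (Int × Int) := (PySem.List.pyRange 0 rows).flatMap
    (fun r => (PySem.List.pyRange 0 (be - bs)).filterMap
      (fun c => if pvAt block r c == 0 then some (r, c) else none))
  List.replicate 3 (PySem.Dict.getD pvPM zeros 2)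
def pvFin (zero_cols : List (List Int)) : List Int :=
  List.replicate 3 (PySem.Dict.getD pvPM
    ((PySem.List.enumerate zero_cols).flatMap (fun rcs => rcs.2.map (fun x => (rcs.1, x)))) 2)
def pvStep (grid : List (List Int)) (rows : Int)
    (st : Int × List (List Int) × List (List Int)) (c : Int) :
    Int × List (List Int) × List (List Int) :=
  if pvSep grid rows c then
    (c + 1, (PySem.List.pyRange 0 rows).map (fun _ => ([] : List Int)), st.2.2 ++ [pvFin st.2.1])
  else
    (st.1,
     (PySem.List.enumerate st.2.1).map
       (fun rcs => if pvAt grid rcs.1 c == 0 then rcs.2 ++ [c - st.1] else rcs.2),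
     st.2.2)

lemma pvZlist_succ (grid : List (List Int)) (r bs c : Int) (h : bs ≤ c) :
    pvZlist grid r bs (c + 1) =
      if pvAt grid r c == 0 then pvZlist grid r bs c ++ [c - bs] else pvZlist grid r bs c := by
  unfold pvZlist
  have h1 : c + 1 - bs = (c - bs) + 1 := by omega
  rw [h1, PySem.List.pyRange_one_succ_right (by omega : (0:Int) ≤ c - bs), List.filter_append]
  have h2 : bs + (c - bs) = c := by omega
  simp only [h2, List.filter_cons, List.filter_nil]
  split_ifs <;> simp_all

lemma pvEnum_map (f : Int → List Int) (n : Int) (hn : 0 ≤ n) :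
    PySem.List.enumerate ((PySem.List.pyRange 0 n).map f) =
      (PySem.List.pyRange 0 n).map (fun j => (j, f j)) := by
  rw [PySem.List.enumerate_eq_map_pyRange _ []]
  have hlen : PySem.List.len ((PySem.List.pyRange 0 n).map f) = n := by
    simp [PySem.List.len, PySem.List.length_pyRange_one]; omega
  rw [hlen]
  apply List.map_congr_left
  intro j hj
  rw [PySem.List.mem_pyRange_one] at hj
  simp [PySem.List.pyGetD_map_pyRange_of_nonneg f n j [] hj.1 hj.2]

lemma pvFilterMapIf {α : Type} (l : List Int) (p : Int → Bool) (f : Int → α) :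
    l.filterMap (fun c => if p c then some (f c) else none) = (l.filter p).map f := by
  induction l with
  | nil => rfl
  | cons x xs ih => by_cases h : p x <;> simp [h, ih]

lemma pvFin_acc (grid : List (List Int)) (rows bs c : Int) (hr : 0 ≤ rows) :
    pvFin (pvAcc grid rows bs c) = pvRow grid rows bs c := by
  unfold pvFin pvAcc pvRow pvZeros
  rw [pvEnum_map _ rows hr, List.flatMap_def, List.map_map, ← List.flatMap_def]
  rfl

lemma pvRange_shift (bs be : Int) :
    PySem.List.pyRange bs be = (PySem.List.pyRange 0 (be - bs)).map (fun x => bs + x) := by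
  rw [PySem.List.pyRange_one, PySem.List.pyRange_one, List.map_map]
  simp

lemma pvGA_row (grid : List (List Int)) (rows bs be : Int) :
    pvGA grid rows (bs, be) = pvRow grid rows bs be := by
  unfold pvGA pvRow pvZeros pvZlist pvAt
  simp only
  congr 2
  apply List.flatMap_congr
  intro r hrm
  rw [PySem.List.mem_pyRange_one] at hrm
  rw [PySem.List.pyGetD_map_pyRange_of_nonneg _ rows r [] hrm.1 hrm.2]
  rw [List.filterMap_congr (g := fun x =>
        if PySem.List.pyGetD (PySem.List.pyGetD grid r []) (bs + x) 0 == 0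
        then some ((r:Int), x) else none) ?_]
  · exact pvFilterMapIf _ _ _
  · intro x hx
    rw [PySem.List.mem_pyRange_one] at hx
    rw [pvRange_shift, List.map_map,
        PySem.List.pyGetD_map_pyRange_of_nonneg _ (be - bs) x 0 hx.1 hx.2]
    rfl

lemma pvStep_acc (grid : List (List Int)) (rows bs c : Int) (hr : 0 ≤ rows) (h : bs ≤ c)
    (hns : pvSep grid rows c = false) (res : List (List Int)) :
    pvStep grid rows (bs, pvAcc grid rows bs c, res) c =
      (bs, pvAcc grid rows bs (c + 1), res) := by
  unfold pvStep
  rw [hns]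
  simp only [Bool.false_eq_true, if_false]
  congr 1
  congr 1
  unfold pvAcc
  rw [pvEnum_map _ rows hr, List.map_map]
  apply List.map_congr_left
  intro r _
  simp only [Function.comp]
  rw [pvZlist_succ grid r bs c h]

def pvPairs (grid : List (List Int)) (rows cols bs c : Int) : List (Int × Int) :=
  let seps := (PySem.List.pyRange c cols).filter (pvSep grid rows)
  List.zip (bs :: seps.map (fun s => s + 1)) (seps ++ [cols])

lemma pvAcc_nil (grid : List (List Int)) (rows b : Int) :
    (PySem.List.pyRange 0 rows).map (fun _ => ([] : List Int)) = pvAcc grid rows b b := by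
  unfold pvAcc
  apply List.map_congr_left
  intro r _
  rw [show pvZlist grid r b b = [] by
    unfold pvZlist; rw [show b - b = 0 by omega]; rfl]

lemma pvMain (grid : List (List Int)) (rows cols : Int) (hr : 0 ≤ rows) :
    ∀ (n : Nat) (bs c : Int) (res : List (List Int)), 0 ≤ bs → bs ≤ c → c ≤ cols →
      (cols - c).toNat = n →
      (let fin := (PySem.List.pyRange c cols).foldl (pvStep grid rows) (bs, pvAcc grid rows bs c, res)
       fin.2.2 ++ [pvFin fin.2.1]) =
      res ++ (pvPairs grid rows cols bs c).map (pvGA grid rows) := by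
  intro n
  induction n with
  | zero =>
    intro bs c res hbs hbc hcc hn
    have hc : c = cols := by omega
    subst hc
    rw [PySem.List.pyRange_one_eq_nil le_rfl]
    simp only [List.foldl_nil, pvPairs, PySem.List.pyRange_one_eq_nil le_rfl,
      List.filter_nil, List.map_nil, List.nil_append, List.zip_cons_cons, List.zip_nil_left,
      List.map_cons]
    rw [pvFin_acc grid rows bs c hr, pvGA_row grid rows bs c]
  | succ n ih =>
    intro bs c res hbs hbc hcc hn
    have hclt : c < cols := by omega
    rw [PySem.List.pyRange_one_cons hclt]
    simp only [List.foldl_cons]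
    by_cases hsep : pvSep grid rows c = true
    · have hstep : pvStep grid rows (bs, pvAcc grid rows bs c, res) c =
          (c + 1, pvAcc grid rows (c+1) (c+1), res ++ [pvFin (pvAcc grid rows bs c)]) := by
        unfold pvStep
        rw [hsep, if_pos rfl, pvAcc_nil grid rows (c+1)]
      rw [hstep, ih (c+1) (c+1) (res ++ [pvFin (pvAcc grid rows bs c)]) (by omega) le_rfl
        (by omega) (by omega)]
      rw [pvFin_acc grid rows bs c hr]
      simp only [pvPairs, PySem.List.pyRange_one_cons hclt, List.filter_cons, hsep,
        if_true, List.map_cons, List.cons_append, List.zip_cons_cons,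
        List.append_assoc, List.nil_append]
      rw [pvGA_row grid rows bs c]
    · have hsep' : pvSep grid rows c = false := by simpa using hsep
      rw [pvStep_acc grid rows bs c hr hbc hsep' res]
      rw [ih bs (c+1) res hbs (by omega) (by omega) (by omega)]
      simp only [pvPairs, PySem.List.pyRange_one_cons hclt, List.filter_cons, hsep',
        Bool.false_eq_true, if_false]

lemma pvB_eq (grid : List (List Int)) :
    transform_alt grid =
      (let fin := (PySem.List.pyRange 0 ((PySem.List.pyGetD grid 0 []).length : Int)).foldl
          (pvStep grid (grid.length : Int))
          (0, pvAcc grid (grid.length : Int) 0 0, [])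
       fin.2.2 ++ [pvFin fin.2.1]) := by
  rfl

lemma pvA_eq (grid : List (List Int)) :
    transform grid =
      (pvPairs grid (grid.length : Int) ((PySem.List.pyGetD grid 0 []).length : Int) 0 0).map
        (pvGA grid (grid.length : Int)) := by
  have h1 : transform grid =
      (PySem.List.enumerate (List.zip
        (0 :: ((PySem.List.pyRange 0 ((PySem.List.pyGetD grid 0 []).length : Int)).filter
            (pvSep grid (grid.length : Int))).map (fun c => c + 1))
        (((PySem.List.pyRange 0 ((PySem.List.pyGetD grid 0 []).length : Int)).filter
            (pvSep grid (grid.length : Int))) ++ [((PySem.List.pyGetD grid 0 []).length : Int)]))).foldl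
        (fun result bp => result ++ [pvGA grid (grid.length : Int) bp.2]) [] := rfl
  rw [h1, PySem.List.foldl_append_singleton_eq_map, List.nil_append]
  unfold pvPairs
  conv_rhs => rw [← PySem.List.map_snd_enumerate (List.zip
    (0 :: ((PySem.List.pyRange 0 ((PySem.List.pyGetD grid 0 []).length : Int)).filter
        (pvSep grid (grid.length : Int))).map (fun c => c + 1))
    (((PySem.List.pyRange 0 ((PySem.List.pyGetD grid 0 []).length : Int)).filter
        (pvSep grid (grid.length : Int))) ++ [((PySem.List.pyGetD grid 0 []).length : Int)])) 0]
  rw [List.map_map]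
  rfl

-- ===== VERDICT (by name: the statement is the Claim_ definition above) =====
theorem transform_spec : Claim_equal_transform := by
  intro grid _ _
  unfold Spec_transform
  rw [pvA_eq, pvB_eq]
  rw [pvMain grid (grid.length : Int) ((PySem.List.pyGetD grid 0 []).length : Int)
      (by positivity) ((PySem.List.pyGetD grid 0 []).length : Int).toNat 0 0 [] le_rfl le_rfl
      (by positivity) (by simp)]
  simp
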